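-- pv_equiv track=rewrite | github.com/thealper2/codewars-solutions | 7-kyu/keypad_horror.py | computer_to_phone
-- ===== SOURCE A (Python) =====
-- def computer_to_phone(numbers):
--     result = ""
--     for number in numbers:
--         if number == "0":
--             result += number
--         elif int(number) > 6:
--             result += str(int(number) - 6)
--         elif int(number) < 4:
--             result += str(int(number) + 6)
--         else:
--             result += number
--
--     return result
-- ===== SOURCE B (Python) =====
-- def computer_to_phone(numbers):
--     mapping = "0789456123"
--     return "".join(mapping[int(number)] for number in numbers)
-- ===== Notes on version B (the rewrite author's own statement) =====
-- stated objective: simpler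
-- what changed: Replaces the if/elif branch chain and string accumulation loop with a precomputed 10-entry translation table indexed by int(digit) and a single str.join over a generator.
import Mathlib
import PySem

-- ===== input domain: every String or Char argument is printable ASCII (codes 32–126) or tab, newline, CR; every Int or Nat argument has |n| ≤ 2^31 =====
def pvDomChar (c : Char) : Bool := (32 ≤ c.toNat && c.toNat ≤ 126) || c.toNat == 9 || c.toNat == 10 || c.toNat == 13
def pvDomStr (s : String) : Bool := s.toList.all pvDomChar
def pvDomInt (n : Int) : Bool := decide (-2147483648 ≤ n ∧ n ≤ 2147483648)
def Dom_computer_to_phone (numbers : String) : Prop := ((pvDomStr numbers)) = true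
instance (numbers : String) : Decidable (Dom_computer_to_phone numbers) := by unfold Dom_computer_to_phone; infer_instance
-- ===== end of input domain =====

-- B replaces A's if/elif branch chain and string-accumulation loop by a 10-entry
-- translation table indexed by int(digit) and a single join over the characters (simpler).

-- ===== PORT A =====
-- A's loop: result accumulator, branch chain per character; int(number) = PySem.Int.ofStr?
-- (none = ValueError, excluded by Pre_, so .getD 0 is never taken on admitted inputs).
def ctpAGo : List Char → String → String
  | [], acc => acc
  | c :: rest, acc =>
    ctpAGo rest (acc ++
      (if c = '0' then String.ofList [c]
       else
         let n := (PySem.Int.ofStr? (String.ofList [c])).getD 0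
         if n > 6 then PySem.Int.toStr (n - 6)
         else if n < 4 then PySem.Int.toStr (n + 6)
         else String.ofList [c]))

def computer_to_phone (numbers : String) : String := ctpAGo numbers.toList ""

-- ===== PORT B =====
-- mapping[int(c)]; the index is always in range on admitted inputs, so .getD c is never taken.
def ctpMapping : String := "0789456123"

def ctpBChar (c : Char) : Char :=
  (PySem.Str.pyGet? ctpMapping ((PySem.Int.ofStr? (String.ofList [c])).getD 0)).getD c

def computer_to_phone_alt (numbers : String) : String :=
  String.ofList (numbers.toList.map ctpBChar)

-- ===== PRECONDITION & SPEC =====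
-- Pre_ excludes exactly the inputs on which A raises ValueError: any character that is not a decimal digit.
def Pre_computer_to_phone (numbers : String) : Prop :=
  numbers.toList.all (fun c => decide (c ∈ ['0','1','2','3','4','5','6','7','8','9'])) = true
instance (numbers : String) : Decidable (Pre_computer_to_phone numbers) := by
  unfold Pre_computer_to_phone; infer_instance
def pvWitness_computer_to_phone : String := "7"

def Spec_computer_to_phone (numbers : String) (out : String) : Prop := out = computer_to_phone_alt numbers
instance (numbers : String) (out : String) : Decidable (Spec_computer_to_phone numbers out) := by unfold Spec_computer_to_phone; infer_instance

-- ===== CLAIM (what is proved, stated in full; the proofs are below) =====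
def Claim_equal_computer_to_phone : Prop := ∀ (numbers : String), Dom_computer_to_phone numbers → Pre_computer_to_phone numbers → Spec_computer_to_phone numbers (computer_to_phone numbers)

-- ===== LEMMAS AND PROOFS =====

lemma ctp_step (c : Char) (h : c ∈ ['0','1','2','3','4','5','6','7','8','9']) :
    (if c = '0' then String.ofList [c]
     else
       let n := (PySem.Int.ofStr? (String.ofList [c])).getD 0
       if n > 6 then PySem.Int.toStr (n - 6)
       else if n < 4 then PySem.Int.toStr (n + 6)
       else String.ofList [c]) = String.ofList [ctpBChar c] := by
  fin_cases h <;> decide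

lemma ctpAGo_spec (l : List Char) :
    ∀ acc : String, (∀ c ∈ l, c ∈ ['0','1','2','3','4','5','6','7','8','9']) →
      ctpAGo l acc = acc ++ String.ofList (l.map ctpBChar) := by
  induction l with
  | nil => intro acc _; rw [ctpAGo, List.map_nil, String.ofList_nil, String.append_empty]
  | cons c rest ih =>
    intro acc h
    have hc := h c (List.mem_cons_self ..)
    have hrest : ∀ x ∈ rest, x ∈ ['0','1','2','3','4','5','6','7','8','9'] :=
      fun x hx => h x (List.mem_cons_of_mem _ hx)
    rw [ctpAGo, ctp_step c hc, ih _ hrest, String.append_assoc, ← String.ofList_append,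
      List.singleton_append, List.map_cons]

-- ===== VERDICT (by name: the statement is the Claim_ definition above) =====
theorem computer_to_phone_spec : Claim_equal_computer_to_phone := by
  intro numbers _ hpre
  rw [Pre_computer_to_phone, List.all_eq_true] at hpre
  simp only [decide_eq_true_eq] at hpre
  unfold Spec_computer_to_phone computer_to_phone computer_to_phone_alt
  rw [ctpAGo_spec _ _ hpre, String.empty_append]
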